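-- pv_equiv track=rewrite | github.com/schneiderb-projects/Festo-CMMO-Control-Via-CVE | CVE.py | formatBin
-- ===== SOURCE A (Python) =====
-- def formatBin(b, length=32):
--     """
--     format a binary string to make it more readable
--     """
--     toReturn = ""
--     s = b[:2]
--     s2 = b[2:]
--     if len(s2) < length:
--         s2 = ('0' * (length - len(s2))) + s2
--
--     for i, x in enumerate(reversed(s2)):
--         if i != 0 and i % 4 == 0:
--             toReturn = " " + toReturn
--         toReturn = x + toReturn
--
--     return s + toReturn
-- ===== SOURCE B (Python) =====
-- def formatBin(b, length=32):
--     """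
--     format a binary string to make it more readable
--     """
--     s = b[:2]
--     s2 = b[2:]
--     if len(s2) < length:
--         s2 = '0' * (length - len(s2)) + s2
--     rev = s2[::-1]
--     groups = []
--     while rev:
--         groups.append(rev[:4])
--         rev = rev[4:]
--     return s + ' '.join(groups)[::-1]
-- ===== Notes on version B (the rewrite author's own statement) =====
-- stated objective: faster
-- what changed: A builds the output one character at a time, prepending to an immutable string (quadratic prepends) with a space inserted whenever the running index hits a multiple of 4; B slices the reversed bit string into 4-character groups with a while loop and joins the groups with a single space, then reverses back.
import Mathlib
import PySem

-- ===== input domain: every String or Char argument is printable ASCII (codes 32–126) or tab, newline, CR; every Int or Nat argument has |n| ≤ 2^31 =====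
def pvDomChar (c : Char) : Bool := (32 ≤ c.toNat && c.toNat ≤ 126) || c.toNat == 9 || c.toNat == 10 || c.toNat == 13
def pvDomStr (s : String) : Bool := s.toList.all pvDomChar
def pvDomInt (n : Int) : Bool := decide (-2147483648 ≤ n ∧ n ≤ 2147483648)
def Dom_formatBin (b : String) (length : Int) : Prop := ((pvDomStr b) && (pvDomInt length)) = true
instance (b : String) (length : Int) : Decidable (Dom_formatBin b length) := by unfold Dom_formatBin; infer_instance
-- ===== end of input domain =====

-- B replaces A's quadratic per-character string-prepend loop by slicing the reversed
-- string into 4-character groups and joining them with a space (objective: faster, measured).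


-- ===== PORT A =====
-- literal port of A: b[:2] / b[2:] via PySem slices, '0'*(length-len(s2)) via pyRepeat,
-- then the per-character loop over enumerate(reversed(s2)) prepending to toReturn
def formatBin (b : String) (length : Int) : String :=
  let s := PySem.List.slice b.toList none (some 2)
  let s2 := PySem.List.slice b.toList (some 2) none
  let s2 := if (s2.length : Int) < length
            then PySem.List.pyRepeat ['0'] (length - (s2.length : Int)) ++ s2 else s2
  let toReturn := (PySem.List.enumerate s2.reverse).foldl
      (fun acc ix =>
        ix.2 :: (if ix.1 ≠ 0 ∧ PySem.Int.mod ix.1 4 = 0 then ' ' :: acc else acc)) []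
  String.ofList (s ++ toReturn)

-- ===== PORT B =====
-- the while loop: while rev: groups.append(rev[:4]); rev = rev[4:]
-- rev[:4]/rev[4:] are take/drop (PySem.List.slice_to_natCast / slice_from_natCast)
def pvGroupsGo (rev : List Char) (groups : List (List Char)) : List (List Char) :=
  match rev with
  | [] => groups
  | x :: xs => pvGroupsGo ((x :: xs).drop 4) (groups ++ [(x :: xs).take 4])
  termination_by rev.length
  decreasing_by simp

-- s2[::-1] is List.reverse (PySem.List.slice?_none_none_neg_one); ' '.join is PySem.Chars.join
def formatBin_alt (b : String) (length : Int) : String :=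
  let s := PySem.List.slice b.toList none (some 2)
  let s2 := PySem.List.slice b.toList (some 2) none
  let s2 := if (s2.length : Int) < length
            then PySem.List.pyRepeat ['0'] (length - (s2.length : Int)) ++ s2 else s2
  let rev := s2.reverse
  String.ofList (s ++ (PySem.Chars.join [' '] (pvGroupsGo rev [])).reverse)

-- ===== PRECONDITION & SPEC =====
def Spec_formatBin (b : String) (length : Int) (out : String) : Prop := out = formatBin_alt b length
instance (b : String) (length : Int) (out : String) : Decidable (Spec_formatBin b length out) := by unfold Spec_formatBin; infer_instance

-- ===== CLAIM (what is proved, stated in full; the proofs are below) =====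
def Claim_equal_formatBin : Prop := ∀ (b : String) (length : Int), Dom_formatBin b length → Spec_formatBin b length (formatBin b length)

-- ===== LEMMAS AND PROOFS =====

-- the list of 4-groups, in plain (non-accumulator) form
def pvGroups : List Char → List (List Char)
  | [] => []
  | x :: xs => (x :: xs).take 4 :: pvGroups ((x :: xs).drop 4)
  termination_by l => l.length
  decreasing_by simp

lemma pvGroupsGo_eq (n : Nat) : ∀ (l : List Char) (acc : List (List Char)), l.length ≤ n →
    pvGroupsGo l acc = acc ++ pvGroups l := by
  induction n with
  | zero =>
    intro l acc hl
    have : l = [] := List.eq_nil_of_length_eq_zero (Nat.le_zero.mp hl)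
    subst this; rw [pvGroupsGo, pvGroups]; simp
  | succ n ih =>
    intro l acc hl
    match l with
    | [] => rw [pvGroupsGo, pvGroups]; simp
    | x :: xs =>
      rw [pvGroupsGo, pvGroups, ih _ _ (by simp at hl ⊢; omega)]
      simp

lemma pvGroups_nil : pvGroups [] = [] := by rw [pvGroups]

lemma pvGroups_cons (x : Char) (xs : List Char) :
    pvGroups (x :: xs) = (x :: xs).take 4 :: pvGroups ((x :: xs).drop 4) := by rw [pvGroups]

lemma pvMod4 (i : Int) : PySem.Int.mod i 4 = i % 4 :=
  PySem.Int.mod_eq_emod_of_pos (by norm_num)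

-- A's loop, with the index made explicit
def pvLoopA (i : Int) (l : List Char) (acc : List Char) : List Char :=
  match l with
  | [] => acc
  | x :: xs => pvLoopA (i + 1) xs (x :: (if i ≠ 0 ∧ PySem.Int.mod i 4 = 0 then ' ' :: acc else acc))

lemma foldl_enumerate_eq_pvLoopA (l : List Char) (i : Int) (acc : List Char) :
    (PySem.List.enumerate l i).foldl
      (fun acc ix =>
        ix.2 :: (if ix.1 ≠ 0 ∧ PySem.Int.mod ix.1 4 = 0 then ' ' :: acc else acc)) acc
    = pvLoopA i l acc := by
  induction l generalizing i acc with
  | nil => simp [PySem.List.enumerate, pvLoopA]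
  | cons x xs ih => rw [PySem.List.enumerate_cons]; simp only [List.foldl_cons, pvLoopA, ih]

-- the grouped join of l, reversed — what A's loop builds
def pvJ (l : List Char) : List Char := (PySem.Chars.join [' '] (pvGroups l)).reverse

lemma pvLoopA_eq (n : Nat) : ∀ l : List Char, l.length ≤ n →
    (∀ acc, pvLoopA 0 l acc = pvJ l ++ acc) ∧
    (∀ acc (i : Int), 0 < i → i % 4 = 0 →
      pvLoopA i l acc = pvJ l ++ (if l.isEmpty then acc else ' ' :: acc)) := by
  induction n with
  | zero =>
    intro l hl
    have : l = [] := List.eq_nil_of_length_eq_zero (Nat.le_zero.mp hl)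
    subst this
    constructor <;> intros <;>
      simp [pvLoopA, pvJ, pvGroups_nil, PySem.Chars.join_nil]
  | succ n ih =>
    intro l hl
    match l with
    | [] =>
      constructor <;> intros <;>
        simp [pvLoopA, pvJ, pvGroups_nil, PySem.Chars.join_nil]
    | [a] =>
      refine ⟨fun acc => ?_, fun acc i hi h4 => ?_⟩
      · norm_num [pvLoopA, pvMod4, pvJ, pvGroups_cons, pvGroups_nil, PySem.Chars.join_singleton]
      · have e0 : i ≠ 0 ∧ PySem.Int.mod i 4 = 0 := ⟨by omega, by rw [pvMod4]; exact h4⟩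
        simp only [pvLoopA, if_pos e0]
        norm_num [pvJ, pvGroups_cons, pvGroups_nil, PySem.Chars.join_singleton]
    | [a, b] =>
      refine ⟨fun acc => ?_, fun acc i hi h4 => ?_⟩
      · norm_num [pvLoopA, pvMod4, pvJ, pvGroups_cons, pvGroups_nil, PySem.Chars.join_singleton]
      · have e0 : i ≠ 0 ∧ PySem.Int.mod i 4 = 0 := ⟨by omega, by rw [pvMod4]; exact h4⟩
        have e1 : ¬(i + 1 ≠ 0 ∧ PySem.Int.mod (i + 1) 4 = 0) := by rw [pvMod4]; omega
        simp only [pvLoopA, if_pos e0, if_neg e1]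
        norm_num [pvJ, pvGroups_cons, pvGroups_nil, PySem.Chars.join_singleton]
    | [a, b, c] =>
      refine ⟨fun acc => ?_, fun acc i hi h4 => ?_⟩
      · norm_num [pvLoopA, pvMod4, pvJ, pvGroups_cons, pvGroups_nil, PySem.Chars.join_singleton]
      · have e0 : i ≠ 0 ∧ PySem.Int.mod i 4 = 0 := ⟨by omega, by rw [pvMod4]; exact h4⟩
        have e1 : ¬(i + 1 ≠ 0 ∧ PySem.Int.mod (i + 1) 4 = 0) := by rw [pvMod4]; omega
        have e2 : ¬(i + 1 + 1 ≠ 0 ∧ PySem.Int.mod (i + 1 + 1) 4 = 0) := by rw [pvMod4]; omega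
        simp only [pvLoopA, if_pos e0, if_neg e1, if_neg e2]
        norm_num [pvJ, pvGroups_cons, pvGroups_nil, PySem.Chars.join_singleton]
    | a :: b :: c :: d :: rest =>
      have hlen : rest.length ≤ n := by simp at hl; omega
      have hrest := ih rest hlen
      have step4 : ∀ (i : Int) (acc' : List Char), i % 4 = 0 → 0 < i + 4 →
          pvLoopA (i + 1 + 1 + 1 + 1) rest acc'
            = pvJ rest ++ (if rest.isEmpty then acc' else ' ' :: acc') := by
        intro i acc' h4 hpos
        rw [show i + 1 + 1 + 1 + 1 = i + 4 by ring]
        exact hrest.2 acc' (i + 4) hpos (by omega)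
      have hjoin : ∀ acc', pvJ (a :: b :: c :: d :: rest) ++ acc'
          = pvJ rest ++ (if rest.isEmpty then d :: c :: b :: a :: acc'
                         else ' ' :: d :: c :: b :: a :: acc') := by
        intro acc'
        match rest with
        | [] => simp [pvJ, pvGroups_cons, pvGroups_nil, PySem.Chars.join_singleton]
        | r :: rs =>
          have hg : pvGroups (a :: b :: c :: d :: r :: rs)
              = [a, b, c, d] :: pvGroups (r :: rs) := by
            rw [pvGroups_cons]; simp
          obtain ⟨q, qs, hq⟩ : ∃ q qs, pvGroups (r :: rs) = q :: qs := by
            rw [pvGroups_cons]; exact ⟨_, _, rfl⟩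
          rw [pvJ, hg, hq, PySem.Chars.join_cons_cons, ← hq]
          simp [pvJ]
      refine ⟨fun acc => ?_, fun acc i hi h4 => ?_⟩
      · have e0 : ¬((0:Int) ≠ 0 ∧ PySem.Int.mod 0 4 = 0) := by simp
        have e1 : ¬((0:Int) + 1 ≠ 0 ∧ PySem.Int.mod (0 + 1) 4 = 0) := by rw [pvMod4]; omega
        have e2 : ¬((0:Int) + 1 + 1 ≠ 0 ∧ PySem.Int.mod (0 + 1 + 1) 4 = 0) := by rw [pvMod4]; omega
        have e3 : ¬((0:Int) + 1 + 1 + 1 ≠ 0 ∧ PySem.Int.mod (0 + 1 + 1 + 1) 4 = 0) := by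
          rw [pvMod4]; omega
        simp only [pvLoopA, if_neg e0, if_neg e1, if_neg e2, if_neg e3]
        rw [step4 0 _ (by omega) (by omega)]; simp [hjoin]
      · have e0 : i ≠ 0 ∧ PySem.Int.mod i 4 = 0 := ⟨by omega, by rw [pvMod4]; exact h4⟩
        have e1 : ¬(i + 1 ≠ 0 ∧ PySem.Int.mod (i + 1) 4 = 0) := by rw [pvMod4]; omega
        have e2 : ¬(i + 1 + 1 ≠ 0 ∧ PySem.Int.mod (i + 1 + 1) 4 = 0) := by rw [pvMod4]; omega
        have e3 : ¬(i + 1 + 1 + 1 ≠ 0 ∧ PySem.Int.mod (i + 1 + 1 + 1) 4 = 0) := by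
          rw [pvMod4]; omega
        simp only [pvLoopA, if_pos e0, if_neg e1, if_neg e2, if_neg e3]
        rw [step4 i _ h4 (by omega)]; simp [hjoin]

-- ===== VERDICT (by name: the statement is the Claim_ definition above) =====
theorem formatBin_spec : Claim_equal_formatBin := by
  intro b length _
  show formatBin b length = formatBin_alt b length
  simp only [formatBin, formatBin_alt]
  rw [foldl_enumerate_eq_pvLoopA]
  rw [(pvLoopA_eq _ _ (Nat.le_refl _)).1]
  rw [pvGroupsGo_eq _ _ _ (Nat.le_refl _)]
  simp [pvJ]
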